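-- pv_equiv track=rewrite | github.com/charleschetty/learn-code | python/lunzi/2.py | diag_from_list
-- ===== SOURCE A (Python) =====
-- def diag_from_list(x:list):
--     a=[]
--     for i in range(0,len(x)):
--         hh=[]
--         for j in range(0,len(x)):
--             if i==j:
--                 hh.append(x[j])
--             else:
--                 hh.append(0)
--         a.append(hh)
--     return a
-- ===== SOURCE B (Python) =====
-- def diag_from_list(x: list):
--     n = len(x)
--     flat = [0] * (n * n)
--     flat[::n + 1] = x
--     return [flat[i * n:(i + 1) * n] for i in range(n)]
-- ===== Notes on version B (the rewrite author's own statement) =====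
-- stated objective: alternative
-- what changed: Builds one flat zero buffer of n*n cells, writes the diagonal in a single strided slice assignment flat[::n+1] = x, and chops the buffer into rows, instead of A's nested per-cell loops with an i==j branch.
import Mathlib
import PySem

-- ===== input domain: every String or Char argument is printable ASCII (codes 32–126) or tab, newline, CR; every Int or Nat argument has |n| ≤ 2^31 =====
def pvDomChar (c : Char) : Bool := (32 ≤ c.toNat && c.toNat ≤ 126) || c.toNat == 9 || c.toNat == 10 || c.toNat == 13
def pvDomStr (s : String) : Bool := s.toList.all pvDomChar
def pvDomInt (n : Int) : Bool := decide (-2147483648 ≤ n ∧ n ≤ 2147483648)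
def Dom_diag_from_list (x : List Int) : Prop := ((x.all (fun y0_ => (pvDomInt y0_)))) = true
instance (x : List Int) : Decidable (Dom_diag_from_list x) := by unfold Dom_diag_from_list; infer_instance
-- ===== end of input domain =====

-- B builds one flat zero buffer, writes the diagonal with a strided slice assignment
-- flat[::n+1] = x, and chops the buffer into rows (objective: alternative).


-- ===== PORT A =====
-- x[j] is always in range (j ∈ range(len(x))), so pyGetD with default 0 is exact here.
def diag_from_list (x : List Int) : List (List Int) :=
  (PySem.List.pyRange 0 x.length 1).foldl
    (fun a i =>
      a ++ [(PySem.List.pyRange 0 x.length 1).foldl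
        (fun hh j => hh ++ [if i == j then PySem.List.pyGetD x j 0 else 0]) []])
    []

-- ===== PORT B =====
-- Hand port of the extended-slice assignment flat[::n+1] = x: it writes x's elements at
-- positions 0, n+1, 2(n+1), …; it is exact here because the slice has exactly
-- ceil(n*n/(n+1)) = n = len(x) targets for n ≥ 1 (and 0 for n = 0), so Python never raises.
def pyWriteStride (flat : List Int) (pos step : Nat) : List Int → List Int
  | [] => flat
  | v :: vs => pyWriteStride (flat.set pos v) (pos + step) step vs

-- flat[i*n:(i+1)*n] with 0 ≤ i < n is PySem.List.slice with those (nonnegative) bounds.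
def diag_from_list_alt (x : List Int) : List (List Int) :=
  (PySem.List.pyRange 0 x.length 1).map (fun i =>
    PySem.List.slice
      (pyWriteStride (List.replicate (x.length * x.length) (0 : Int)) 0 (x.length + 1) x)
      (some (i * (x.length : Int))) (some ((i + 1) * (x.length : Int))))

-- ===== PRECONDITION & SPEC =====
def Spec_diag_from_list (x : List Int) (out : List (List Int)) : Prop := out = diag_from_list_alt x
instance (x : List Int) (out : List (List Int)) : Decidable (Spec_diag_from_list x out) := by unfold Spec_diag_from_list; infer_instance

-- ===== CLAIM =====
def Claim_equal_diag_from_list : Prop := ∀ (x : List Int), Dom_diag_from_list x → Spec_diag_from_list x (diag_from_list x)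

-- ===== LEMMAS AND PROOFS =====

theorem writeStride_length (xs : List Int) : ∀ (flat : List Int) (pos step : Nat),
    (pyWriteStride flat pos step xs).length = flat.length := by
  induction xs with
  | nil => intro flat pos step; simp [pyWriteStride]
  | cons v vs ih => intro flat pos step; simp [pyWriteStride, ih]

-- positions not of the form pos + j*step are untouched
theorem writeStride_miss (xs : List Int) : ∀ (flat : List Int) (pos step p : Nat),
    (∀ j, j < xs.length → p ≠ pos + j * step) →
    (pyWriteStride flat pos step xs).getD p 0 = flat.getD p 0 := by
  induction xs with
  | nil => intro flat pos step p _; simp [pyWriteStride]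
  | cons v vs ih =>
    intro flat pos step p h
    have hne : p ≠ pos := by
      have := h 0 (by simp)
      simpa using this
    have h' : ∀ j, j < vs.length → p ≠ pos + step + j * step := by
      intro j hj heq
      have := h (j + 1) (by simp; omega)
      apply this
      rw [Nat.succ_mul]
      rw [heq, Nat.add_assoc, Nat.add_comm step (j * step)]
    rw [show pyWriteStride flat pos step (v :: vs)
          = pyWriteStride (flat.set pos v) (pos + step) step vs from rfl]
    rw [ih _ _ _ _ h']
    simp [List.getD, List.getElem?_set_ne (Ne.symm hne)]

-- position pos + j*step receives xs[j]
theorem writeStride_hit (xs : List Int) : ∀ (flat : List Int) (pos step j : Nat),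
    0 < step → j < xs.length → pos + j * step < flat.length →
    (pyWriteStride flat pos step xs).getD (pos + j * step) 0 = xs.getD j 0 := by
  induction xs with
  | nil => intro flat pos step j _ hj _; simp at hj
  | cons v vs ih =>
    intro flat pos step j hstep hj hb
    cases j with
    | zero =>
      simp only [Nat.zero_mul, Nat.add_zero] at hb ⊢
      rw [show pyWriteStride flat pos step (v :: vs)
            = pyWriteStride (flat.set pos v) (pos + step) step vs from rfl]
      rw [writeStride_miss vs _ _ _ pos ?_]
      · simp [List.getD, hb]
      · intro j hj heq
        have h2 : pos + step ≤ pos := by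
          calc pos + step ≤ pos + step + j * step := Nat.le_add_right _ _
          _ = pos := heq.symm
        omega
    | succ j =>
      have hkey : pos + (j + 1) * step = (pos + step) + j * step := by
        rw [Nat.succ_mul, Nat.add_comm (j * step) step, ← Nat.add_assoc]
      rw [show pyWriteStride flat pos step (v :: vs)
            = pyWriteStride (flat.set pos v) (pos + step) step vs from rfl]
      rw [hkey]
      rw [ih _ _ _ _ hstep (by simpa using hj) (by simp [List.length_set]; omega)]
      simp [List.getD]

-- the flat buffer holds the diagonal matrix, cell (i,k) at offset i*n+k
theorem flat_entry (x : List Int) (i k : Nat) (hi : i < x.length) (hk : k < x.length) :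
    (pyWriteStride (List.replicate (x.length * x.length) (0 : Int)) 0 (x.length + 1) x).getD
        (i * x.length + k) 0
      = if (i : Int) = (k : Int) then PySem.List.pyGetD x (k : Int) 0 else 0 := by
  set n := x.length with hn
  have hrow : i * n + n ≤ n * n := by
    calc i * n + n = (i + 1) * n := by rw [Nat.succ_mul]
    _ ≤ n * n := Nat.mul_le_mul_right n (by omega)
  by_cases hik : i = k
  · subst hik
    have hpos : i * n + i = 0 + i * (n + 1) := by
      rw [Nat.mul_succ]; omega
    rw [hpos, writeStride_hit x _ 0 (n + 1) i (by omega) hi (by simp; nlinarith)]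
    rw [PySem.List.pyGetD_natCast]
    simp
  · have hmiss : ∀ j, j < x.length → i * n + k ≠ 0 + j * (n + 1) := by
      intro j hj heq
      rw [Nat.zero_add, Nat.mul_succ] at heq
      rcases Nat.lt_trichotomy i j with h | h | h
      · have hle : i * n + n ≤ j * n := by
          calc i * n + n = (i + 1) * n := by rw [Nat.succ_mul]
          _ ≤ j * n := Nat.mul_le_mul_right n h
        nlinarith
      · subst h
        exact hik (by omega)
      · have hle : j * n + n ≤ i * n := by
          calc j * n + n = (j + 1) * n := by rw [Nat.succ_mul]
          _ ≤ i * n := Nat.mul_le_mul_right n h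
        nlinarith
    rw [writeStride_miss x _ 0 (n + 1) _ hmiss]
    have : ¬ ((i : Int) = (k : Int)) := by omega
    simp [this, List.getD, List.getElem?_replicate]
    split <;> rfl

-- ===== VERDICT =====
theorem diag_from_list_spec : Claim_equal_diag_from_list := by
  intro x _
  unfold Spec_diag_from_list diag_from_list diag_from_list_alt
  rw [PySem.List.foldl_append_singleton_eq_map, List.nil_append]
  set n := x.length with hn
  have hlenflat : (pyWriteStride (List.replicate (n * n) (0 : Int)) 0 (n + 1) x).length
      = n * n := by
    rw [writeStride_length]; simp
  apply List.ext_getElem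
  · simp [PySem.List.length_pyRange_one]
  · intro i hi1 hi2
    have hiL : i < n := by simpa [PySem.List.length_pyRange_one] using hi1
    simp only [List.getElem_map, PySem.List.getElem_pyRange_one, zero_add]
    rw [PySem.List.foldl_append_singleton_eq_map, List.nil_append]
    have hc1 : ((i : Int)) * (n : Int) = ((i * n : Nat) : Int) := by push_cast; ring
    have hc2 : ((i : Int) + 1) * (n : Int) = (((i + 1) * n : Nat) : Int) := by push_cast; ring
    rw [hc1, hc2, PySem.List.slice_natCast]
    have htake : (i + 1) * n - i * n = n := by
      rw [Nat.succ_mul, Nat.add_comm, Nat.add_sub_cancel]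
    rw [htake]
    have hrow : i * n + n ≤ n * n := by
      calc i * n + n = (i + 1) * n := by rw [Nat.succ_mul]
      _ ≤ n * n := Nat.mul_le_mul_right n (by omega)
    apply List.ext_getElem
    · have h2 : n ≤ n * n - i * n := by omega
      simp [List.length_map, PySem.List.length_pyRange_one, List.length_take,
        List.length_drop, hlenflat, Nat.min_eq_left h2]
    · intro k hk1 hk2
      have hkL : k < n := by simpa [PySem.List.length_pyRange_one] using hk1
      simp only [List.getElem_map, PySem.List.getElem_pyRange_one, zero_add,
        List.getElem_take, List.getElem_drop]
      have hidx : i * n + k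
          < (pyWriteStride (List.replicate (n * n) (0 : Int)) 0 (n + 1) x).length := by
        rw [hlenflat]; omega
      have hgd : (pyWriteStride (List.replicate (n * n) (0 : Int)) 0 (n + 1) x)[i * n + k]'hidx
          = (pyWriteStride (List.replicate (n * n) (0 : Int)) 0 (n + 1) x).getD (i * n + k) 0 := by
        simp [List.getD, List.getElem?_eq_getElem hidx]
      rw [hgd, flat_entry x i k hiL hkL]
      by_cases h : (i : Int) = (k : Int) <;> simp [h]
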